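-- pv_equiv track=rewrite | github.com/ArbitraryOstrich/CodeWars | Python/Alphabet wars - reinforces massacre/main.py | bring_reinforcements
-- ===== SOURCE A (Python) =====
-- def bring_reinforcements(bf,rf):
--     bf = list(bf)
--     # iter over BF looking for _
--     for bf_index in range(0,len(bf)):
--         if bf[bf_index] == '_':
--
--             ## look for reinforcements
--             for rf_index in range(0,len(rf)):
--                 temp = list(rf[rf_index])
--                 ## If current place is a _ hop to next loop
--                 if rf[rf_index][bf_index] == '_':
--                     continue
--                 ## If we get here we can reinforce and break our loop
--                 bf[bf_index] = rf[rf_index][bf_index]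
--                 temp[bf_index] = "_"
--                 rf[rf_index] = "".join(temp)
--
--                 break
--     return "".join(bf),rf
-- ===== SOURCE B (Python) =====
-- def bring_reinforcements(bf, rf):
--     # Row-major filling: each reinforcement row sweeps the battlefield once;
--     # the earliest row automatically wins each blank column.
--     # Like A, mutates rf in place (rows written back after their sweep).
--     field = list(bf)
--     for i in range(len(rf)):
--         row = list(rf[i])
--         for col in range(len(field)):
--             if field[col] == '_' and row[col] != '_':
--                 field[col] = row[col]
--                 row[col] = '_'
--         rf[i] = "".join(row)
--     return "".join(field), rf
-- ===== Notes on version B (the rewrite author's own statement) =====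
-- stated objective: alternative
-- what changed: Replaces A's column-outer search (for each blank battlefield cell, scan reinforcement rows until one supplies a char, mutating as it goes) with a row-major sweep: each reinforcement row passes over the battlefield once, filling the blanks it can, so the earliest row wins each column automatically and the inner break-search disappears.
-- outside the precondition, e.g. on bring_reinforcements('_', ['a', '']): A returns ('a', ['_', '']), B returns ('a', ['_', ''])
import Mathlib
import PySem

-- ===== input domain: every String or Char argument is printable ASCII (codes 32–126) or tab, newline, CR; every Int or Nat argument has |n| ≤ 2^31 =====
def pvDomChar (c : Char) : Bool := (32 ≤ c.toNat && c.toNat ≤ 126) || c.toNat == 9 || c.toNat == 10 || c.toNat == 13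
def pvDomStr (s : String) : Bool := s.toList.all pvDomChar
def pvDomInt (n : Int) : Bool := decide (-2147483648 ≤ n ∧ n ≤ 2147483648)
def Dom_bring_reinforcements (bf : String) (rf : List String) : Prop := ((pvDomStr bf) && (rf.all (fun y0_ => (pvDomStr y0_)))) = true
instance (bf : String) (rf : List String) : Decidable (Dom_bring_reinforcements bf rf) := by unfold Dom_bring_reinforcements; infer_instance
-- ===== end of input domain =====

-- B replaces A's column-outer/row-inner search by a row-major sweep (each reinforcement
-- row passes over the battlefield once; the earliest row wins each blank column);
-- equivalence is about the RETURN value — both Pythons also mutate rf in place identically.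

-- ===== PORT A =====
-- inner 'for rf_index in range(len(rf)) … break' loop of A, at battlefield column i:
-- returns the reinforcing char (if any) and the updated rows (winning row blanked at i).
-- On Python's IndexError (row shorter than i+1, excluded by Pre_) it returns no reinforcement.
def pvInnerA (i : Nat) : List (List Char) → Option Char × List (List Char)
  | [] => (none, [])
  | r :: rest =>
    match r[i]? with
    | none => (none, r :: rest)
    | some c =>
      if c = '_' then
        let res := pvInnerA i rest
        (res.1, r :: res.2)
      else (some c, r.set i '_' :: rest)

-- outer 'for bf_index in range(len(bf))' loop of A, walking the battlefield at column i
def pvOuterA (i : Nat) (rows : List (List Char)) : List Char → List Char × List (List Char)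
  | [] => ([], rows)
  | c :: pend =>
    if c = '_' then
      let res := pvInnerA i rows
      let rec' := pvOuterA (i+1) res.2 pend
      (res.1.getD '_' :: rec'.1, rec'.2)
    else
      let rec' := pvOuterA (i+1) rows pend
      (c :: rec'.1, rec'.2)

def bring_reinforcements (bf : String) (rf : List String) : String × List String :=
  let res := pvOuterA 0 (rf.map String.toList) bf.toList
  (String.ofList res.1, res.2.map String.ofList)

-- ===== PORT B =====
-- one sweep of reinforcement row 'row' over the battlefield, at column col
-- ('if field[col]=='_' and row[col] != '_'' — the none branch is Python's IndexError, excluded by Pre_)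
def pvRowB : List Char → Nat → List Char → List Char × List Char
  | row, _, [] => ([], row)
  | row, col, c :: pend =>
    if c = '_' then
      match row[col]? with
      | some d =>
        if d = '_' then
          let res := pvRowB row (col+1) pend
          (c :: res.1, res.2)
        else
          let res := pvRowB (row.set col '_') (col+1) pend
          (d :: res.1, res.2)
      | none =>
        let res := pvRowB row (col+1) pend
        (c :: res.1, res.2)
    else
      let res := pvRowB row (col+1) pend
      (c :: res.1, res.2)

-- 'for i in range(len(rf))' loop of B: sweep each row in order over the field
def pvOuterB : List Char → List (List Char) → List Char × List (List Char)
  | field, [] => (field, [])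
  | field, r :: rest =>
    let res := pvRowB r 0 field
    let res2 := pvOuterB res.1 rest
    (res2.1, res.2 :: res2.2)

def bring_reinforcements_alt (bf : String) (rf : List String) : String × List String :=
  let res := pvOuterB bf.toList (rf.map String.toList)
  (String.ofList res.1, res.2.map String.ofList)

-- ===== PRECONDITION & SPEC =====
-- Pre_ excludes ragged inputs where some reinforcement row is shorter than the position of
-- some blank battlefield column: on those Python's rf[j][i] usually raises IndexError (in
-- both A and B); the simple length bound also drops a few ragged inputs where an earlier
-- row reinforces the column first so A still returns (B returns the same value there).
def Pre_bring_reinforcements (bf : String) (rf : List String) : Prop :=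
  ∀ i < bf.toList.length, bf.toList[i]? = some '_' → ∀ r ∈ rf, i < r.toList.length

instance (bf : String) (rf : List String) : Decidable (Pre_bring_reinforcements bf rf) := by
  unfold Pre_bring_reinforcements; infer_instance

def pvWitness_bring_reinforcements : String × List String := ("x_a", ["___", "_b_"])

def Spec_bring_reinforcements (bf : String) (rf : List String) (out : String × List String) : Prop := out = bring_reinforcements_alt bf rf
instance (bf : String) (rf : List String) (out : String × List String) : Decidable (Spec_bring_reinforcements bf rf out) := by unfold Spec_bring_reinforcements; infer_instance

-- ===== CLAIM (what is proved, stated in full; the proofs are below) =====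
def Claim_equal_bring_reinforcements : Prop := ∀ (bf : String) (rf : List String), Dom_bring_reinforcements bf rf → Pre_bring_reinforcements bf rf → Spec_bring_reinforcements bf rf (bring_reinforcements bf rf)

-- ===== LEMMAS AND PROOFS =====

-- a row sweep keeps the battlefield length
lemma rowB_length : ∀ (pend row : List Char) (col : Nat),
    (pvRowB row col pend).1.length = pend.length := by
  intro pend
  induction pend with
  | nil => intro row col; simp [pvRowB]
  | cons c p ih =>
    intro row col
    simp only [pvRowB]
    split_ifs with hc
    · rcases h : row[col]? with _ | d
      · simp [ih]
      · by_cases hd : d = '_' <;> simp [hd, ih]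
    · simp [ih]

-- a row sweep never creates a blank in the battlefield
lemma rowB_blank : ∀ (pend row : List Char) (col k : Nat),
    (pvRowB row col pend).1[k]? = some '_' → pend[k]? = some '_' := by
  intro pend
  induction pend with
  | nil => intro row col k h; simpa [pvRowB] using h
  | cons c p ih =>
    intro row col k
    simp only [pvRowB]
    split_ifs with hc
    · rcases h : row[col]? with _ | d
      · cases k with
        | zero => simp [hc]
        | succ k => simpa using ih row (col+1) k
      · by_cases hd : d = '_'
        · cases k with
          | zero => simp [hc]
          | succ k => simp [hd]; simpa using ih row (col+1) k
        · cases k with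
          | zero => simp [hc, hd]
          | succ k => simp [hd]; simpa using ih (row.set col '_') (col+1) k
    · cases k with
      | zero => intro h'; simp_all
      | succ k => simpa using ih row (col+1) k

-- empty reinforcement list: A's outer loop leaves the battlefield untouched
lemma outerA_nil : ∀ (pend : List Char) (i : Nat), pvOuterA i [] pend = (pend, []) := by
  intro pend
  induction pend with
  | nil => intro i; simp [pvOuterA]
  | cons c p ih =>
    intro i
    simp only [pvOuterA, pvInnerA, ih]
    split_ifs with hc <;> simp [hc]

-- THE loop interchange: processing the first reinforcement row against every column
-- before the remaining rows (B) gives the same result as A's per-column search,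
-- provided the first row covers every blank column (Pre_).
lemma rowDecomp : ∀ (pend : List Char) (i : Nat) (r : List Char) (rest : List (List Char)),
    (∀ k < pend.length, pend[k]? = some '_' → i + k < r.length) →
    pvOuterA i (r :: rest) pend =
      ((pvOuterA i rest (pvRowB r i pend).1).1,
       (pvRowB r i pend).2 :: (pvOuterA i rest (pvRowB r i pend).1).2) := by
  intro pend
  induction pend with
  | nil => intro i r rest h; simp [pvOuterA, pvRowB]
  | cons c p ih =>
    intro i r rest h
    have htail : ∀ k < p.length, p[k]? = some '_' → (i+1) + k < r.length := by
      intro k hk hb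
      have := h (k+1) (by simp; omega) (by simpa using hb)
      omega
    by_cases hc : c = '_'
    · subst hc
      have hlen : i < r.length := by
        have := h 0 (by simp) (by simp)
        omega
      rcases hget : r[i]? with _ | d
      · rw [List.getElem?_eq_none_iff] at hget; omega
      by_cases hd : d = '_'
      · subst hd
        simp only [pvOuterA, pvInnerA, pvRowB, hget, if_true]
        rw [ih (i+1) r (pvInnerA i rest).2 htail]
      · have htail' : ∀ k < p.length, p[k]? = some '_' → (i+1) + k < (r.set i '_').length := by
          simpa using htail
        simp only [pvOuterA, pvInnerA, pvRowB, hget, if_true, if_neg hd]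
        rw [ih (i+1) (r.set i '_') rest htail']
        simp
    · simp only [pvOuterA, pvRowB, if_neg hc]
      rw [ih (i+1) r rest htail]

-- A's whole nested loop equals B's whole nested loop, on covered inputs
lemma outerA_eq_outerB : ∀ (rows : List (List Char)) (pend : List Char),
    (∀ r ∈ rows, ∀ k < pend.length, pend[k]? = some '_' → k < r.length) →
    pvOuterA 0 rows pend = pvOuterB pend rows := by
  intro rows
  induction rows with
  | nil => intro pend h; simp [outerA_nil, pvOuterB]
  | cons r rest ih =>
    intro pend h
    have hr : ∀ k < pend.length, pend[k]? = some '_' → 0 + k < r.length := by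
      intro k hk hb; simpa using h r (by simp) k hk hb
    rw [rowDecomp pend 0 r rest hr]
    have hrest : ∀ r' ∈ rest, ∀ k < (pvRowB r 0 pend).1.length,
        (pvRowB r 0 pend).1[k]? = some '_' → k < r'.length := by
      intro r' hr' k hk hb
      exact h r' (by simp [hr']) k (by simpa [rowB_length] using hk) (rowB_blank pend r 0 k hb)
    rw [ih _ hrest]
    simp [pvOuterB]

-- ===== VERDICT (by name: the statement is the Claim_ definition above) =====
theorem bring_reinforcements_spec : Claim_equal_bring_reinforcements := by
  intro bf rf _ hpre
  unfold Spec_bring_reinforcements bring_reinforcements bring_reinforcements_alt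
  rw [outerA_eq_outerB]
  intro rL hrL k hk hb
  rcases List.mem_map.mp hrL with ⟨r, hr, rfl⟩
  simpa using hpre k hk hb r hr
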